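-- pv_equiv track=rewrite | github.com/Ishitani-Takahisa/autoRecorder | createRecord/borderDetect.py | width2field
-- ===== SOURCE A (Python) =====
-- def width2field(top,left,right,player):
--     # def kiriyoku(n,m):
--     #     return n if n%m==0 else n+(m-n%m) if n%m>m/2 else n-n%m
--
--     pf = {
--         "left":left,
--         "right":right,
--     }
--     while (pf["right"] - pf["left"]) % 6 != 0:
--         pf["left"]+=1
--         if (pf["right"] - pf["left"]) % 6 > 0:
--             pf["right"]-=1
--
--     width = pf["right"] - pf["left"]
--     h = round(width*1.8)
--     height = h if h%12==0 else h+(12-h%12) if h%12>5 else h-h%12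
--     player_1_left = pf["left"] if player == 1 else pf["left"]-2*width
--     field = {
--             "top":top,
--             "width":width,
--             "height":height,
--             "1p":player_1_left,
--             "2p":player_1_left+2*width
--         }
--     n_width = round(width/6)
--     _next = {
--             "top":top+round(width/15),
--             "width":n_width,
--             "height":round(width*0.3) if round(width*0.3)%2==0 else round(width*0.3)+1,
--             "1p":field["1p"]+width+round(width*2/15),
--             "2p":field["2p"]-round(width*2/15)-n_width
--         }
--     wn_width = round(_next["width"]*0.7)
--     _wnext = {
--         "top":_next["top"]+_next["height"],
--         "width": wn_width,
--         "height": wn_width*2,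
--         "1p": _next["1p"]+round(0.15*field["width"]),
--         "2p": _next["2p"]-round(0.1*field["width"])
--     }
--
--     return {
--         "field":field,
--         "next": _next,
--         "wnext": _wnext
--     }
-- ===== SOURCE B (Python) =====
-- def width2field(top, left, right, player):
--     # Replace A's while loop by a closed form: r = (right-left) % 6,
--     # left moves up by ceil(r/2), right moves down by floor(r/2).
--     r = (right - left) % 6
--     l = left + (r + 1) // 2
--     width = right - r // 2 - l
--
--     h = round(width * 1.8)
--     height = h if h % 12 == 0 else h + (12 - h % 12) if h % 12 > 5 else h - h % 12
--     p1 = l if player == 1 else l - 2 * width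
--     p2 = p1 + 2 * width
--
--     n_width = round(width / 6)
--     n_top = top + round(width / 15)
--     h3 = round(width * 0.3)
--     n_height = h3 if h3 % 2 == 0 else h3 + 1
--     shift = round(width * 2 / 15)
--     n1 = p1 + width + shift
--     n2 = p2 - shift - n_width
--
--     wn_width = round(n_width * 0.7)
--     return {
--         "field": {"top": top, "width": width, "height": height, "1p": p1, "2p": p2},
--         "next": {"top": n_top, "width": n_width, "height": n_height, "1p": n1, "2p": n2},
--         "wnext": {"top": n_top + n_height, "width": wn_width, "height": wn_width * 2,
--                   "1p": n1 + round(0.15 * width), "2p": n2 - round(0.1 * width)},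
--     }
-- ===== Notes on version B (the rewrite author's own statement) =====
-- stated objective: simpler
-- what changed: Replaced the dict-mutating while loop that aligns left/right to a multiple-of-6 width by a closed-form remainder adjustment (left += (r+1)//2, right -= r//2 with r = (right-left) % 6), and flattened the nested dict construction into direct computation of each value.
import Mathlib
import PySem

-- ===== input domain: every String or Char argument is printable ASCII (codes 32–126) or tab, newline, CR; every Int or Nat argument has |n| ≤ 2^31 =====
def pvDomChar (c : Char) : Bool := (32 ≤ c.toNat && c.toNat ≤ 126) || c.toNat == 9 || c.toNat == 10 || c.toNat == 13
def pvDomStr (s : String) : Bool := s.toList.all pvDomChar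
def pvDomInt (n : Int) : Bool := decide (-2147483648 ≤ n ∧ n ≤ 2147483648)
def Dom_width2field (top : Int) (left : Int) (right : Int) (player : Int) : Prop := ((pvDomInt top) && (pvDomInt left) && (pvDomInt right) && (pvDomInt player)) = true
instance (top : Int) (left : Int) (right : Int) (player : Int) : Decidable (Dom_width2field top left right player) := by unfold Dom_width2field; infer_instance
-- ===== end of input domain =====

-- B replaces A's dict-mutating while loop by a closed-form remainder adjustment and flattens the
-- nested dict construction into direct computation of each value (objective: simpler).

-- ===== SHARED ROUNDING HELPERS (used by both ports) =====
-- Python's round() on a float, and the float ops feeding it, emulated exactly in integers.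
-- rndEven num den = round-half-to-even of the rational num/den (den > 0): Python's round().
def rndEven (num den : Int) : Int :=
  let q := PySem.Int.floordiv num den
  let r2 := 2 * (num - q * den)
  if r2 < den then q else if r2 > den then q + 1
  else if PySem.Int.mod q 2 = 0 then q else q + 1

-- fl53 a s = the IEEE-754 double nearest (round-to-even) to a/2^s, returned as its numerator over 2^s
-- (exact for the magnitudes reachable on Dom: no overflow/subnormals).
def fl53 (a : Int) (_s : Nat) : Int :=
  let A := a.natAbs
  if A = 0 then 0
  else
    let L := Nat.log2 A + 1
    if L ≤ 53 then a
    else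
      let d := L - 53
      let q := A >>> d
      let r := A % 2 ^ d
      let half := 2 ^ (d - 1)
      let q' := if r > half ∨ (r = half ∧ q % 2 = 1) then q + 1 else q
      if a > 0 then ((q' <<< d : Nat) : Int) else -((q' <<< d : Nat) : Int)

-- pyRoundMul c s n = Python's round(f * n) where f is the double c/2^s (exact: one float multiply,
-- then round-half-even; verified against CPython on the whole Dom).
def pyRoundMul (c : Int) (s : Nat) (n : Int) : Int := rndEven (fl53 (c * n) s) ((2 : Int) ^ s)

-- round(n / d) for the true divisions A performs (d = 6 or 15). Exact on every width both ports
-- produce (width divisible by 6): the exact quotient is never within float error of a half-integer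
-- tie, so Python's round of the correctly rounded float quotient equals round-half-even of n/d.
def pyRoundDiv (n d : Int) : Int := rndEven n d

-- dyadic numerators/exponents of the doubles 1.8, 0.3, 0.7, 0.15, 0.1 (from float.hex())
def c18 : Int := 0x1ccccccccccccd
def c03 : Int := 0x13333333333333
def c07 : Int := 0x16666666666666
def c015 : Int := 0x13333333333333
def c01 : Int := 0x1999999999999a

-- ===== PORT A =====
-- A's pf dict has exactly the fixed keys "left"/"right"; it is ported as the pair of their values.
-- The while loop: each iteration drops the remainder (r-l) % 6 ∈ {1..5} by 2 (or to 0), so the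
-- Python loop runs at most 3 times on EVERY input; fuel 3 makes the recursion structural and exact.
def width2fieldLoop : Nat → Int → Int → Int × Int
  | 0, l, r => (l, r)
  | fuel + 1, l, r =>
    if PySem.Int.mod (r - l) 6 ≠ 0 then
      let l' := l + 1
      let r' := if PySem.Int.mod (r - l') 6 > 0 then r - 1 else r
      width2fieldLoop fuel l' r'
    else (l, r)

-- literal dict accesses (field["1p"] etc.) are ported as the let-bound values they were built from
def width2field (top : Int) (left : Int) (right : Int) (player : Int) : List (String × List (String × Int)) :=
  let pf := width2fieldLoop 3 left right
  let width := pf.2 - pf.1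
  let h := pyRoundMul c18 52 width                                  -- round(width*1.8)
  let height := if PySem.Int.mod h 12 = 0 then h
    else if PySem.Int.mod h 12 > 5 then h + (12 - PySem.Int.mod h 12)
    else h - PySem.Int.mod h 12
  let player_1_left := if player = 1 then pf.1 else pf.1 - 2 * width
  let field : List (String × Int) :=
    [("top", top), ("width", width), ("height", height),
     ("1p", player_1_left), ("2p", player_1_left + 2 * width)]
  let n_width := pyRoundDiv width 6                                 -- round(width/6)
  let h3 := pyRoundMul c03 54 width                                 -- round(width*0.3)
  let next : List (String × Int) :=
    [("top", top + pyRoundDiv width 15),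
     ("width", n_width),
     ("height", if PySem.Int.mod h3 2 = 0 then h3 else h3 + 1),
     ("1p", player_1_left + width + pyRoundDiv (width * 2) 15),
     ("2p", (player_1_left + 2 * width) - pyRoundDiv (width * 2) 15 - n_width)]
  let wn_width := pyRoundMul c07 53 n_width                         -- round(n_width*0.7)
  let wnext : List (String × Int) :=
    [("top", (top + pyRoundDiv width 15) + (if PySem.Int.mod h3 2 = 0 then h3 else h3 + 1)),
     ("width", wn_width),
     ("height", wn_width * 2),
     ("1p", (player_1_left + width + pyRoundDiv (width * 2) 15) + pyRoundMul c015 55 width),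
     ("2p", ((player_1_left + 2 * width) - pyRoundDiv (width * 2) 15 - n_width) - pyRoundMul c01 56 width)]
  [("field", field), ("next", next), ("wnext", wnext)]

-- ===== PORT B =====
def width2field_alt (top : Int) (left : Int) (right : Int) (player : Int) : List (String × List (String × Int)) :=
  let r := PySem.Int.mod (right - left) 6
  let l := left + PySem.Int.floordiv (r + 1) 2
  let width := right - PySem.Int.floordiv r 2 - l
  let h := pyRoundMul c18 52 width
  let height := if PySem.Int.mod h 12 = 0 then h
    else if PySem.Int.mod h 12 > 5 then h + (12 - PySem.Int.mod h 12)
    else h - PySem.Int.mod h 12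
  let p1 := if player = 1 then l else l - 2 * width
  let p2 := p1 + 2 * width
  let n_width := pyRoundDiv width 6
  let n_top := top + pyRoundDiv width 15
  let h3 := pyRoundMul c03 54 width
  let n_height := if PySem.Int.mod h3 2 = 0 then h3 else h3 + 1
  let shift := pyRoundDiv (width * 2) 15
  let n1 := p1 + width + shift
  let n2 := p2 - shift - n_width
  let wn_width := pyRoundMul c07 53 n_width
  [("field", [("top", top), ("width", width), ("height", height), ("1p", p1), ("2p", p2)]),
   ("next", [("top", n_top), ("width", n_width), ("height", n_height), ("1p", n1), ("2p", n2)]),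
   ("wnext", [("top", n_top + n_height), ("width", wn_width), ("height", wn_width * 2),
              ("1p", n1 + pyRoundMul c015 55 width), ("2p", n2 - pyRoundMul c01 56 width)])]

-- ===== PRECONDITION & SPEC =====
def Spec_width2field (top : Int) (left : Int) (right : Int) (player : Int) (out : List (String × List (String × Int))) : Prop := out = width2field_alt top left right player
instance (top : Int) (left : Int) (right : Int) (player : Int) (out : List (String × List (String × Int))) : Decidable (Spec_width2field top left right player out) := by unfold Spec_width2field; infer_instance

-- ===== CLAIM (what is proved, stated in full; the proofs are below) =====
def Claim_equal_width2field : Prop := ∀ (top : Int) (left : Int) (right : Int) (player : Int), Dom_width2field top left right player → Spec_width2field top left right player (width2field top left right player)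

-- ===== LEMMAS AND PROOFS =====
theorem width2fieldLoop_eq (l r : Int) :
    width2fieldLoop 3 l r =
      (l + PySem.Int.floordiv (PySem.Int.mod (r - l) 6 + 1) 2,
       r - PySem.Int.floordiv (PySem.Int.mod (r - l) 6) 2) := by
  show width2fieldLoop (2+1) l r = _
  rw [width2fieldLoop]
  simp only [PySem.Int.mod_eq_emod_of_pos (by norm_num : (0:Int) < 6),
    PySem.Int.floordiv_eq_ediv_of_pos (by norm_num : (0:Int) < 2)]
  split_ifs with h1 h2
  · show width2fieldLoop (1+1) _ _ = _
    rw [width2fieldLoop]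
    simp only [PySem.Int.mod_eq_emod_of_pos (by norm_num : (0:Int) < 6)]
    split_ifs with h3 h4
    · show width2fieldLoop (0+1) _ _ = _
      rw [width2fieldLoop]
      simp only [PySem.Int.mod_eq_emod_of_pos (by norm_num : (0:Int) < 6)]
      split_ifs <;> simp only [width2fieldLoop, Prod.mk.injEq] <;> constructor <;> omega
    · show width2fieldLoop (0+1) _ _ = _
      rw [width2fieldLoop]
      simp only [PySem.Int.mod_eq_emod_of_pos (by norm_num : (0:Int) < 6)]
      split_ifs <;> simp only [width2fieldLoop, Prod.mk.injEq] <;> constructor <;> omega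
    · simp only [Prod.mk.injEq]; constructor <;> omega
  · show width2fieldLoop (1+1) _ _ = _
    rw [width2fieldLoop]
    simp only [PySem.Int.mod_eq_emod_of_pos (by norm_num : (0:Int) < 6)]
    split_ifs with h3 h4
    · show width2fieldLoop (0+1) _ _ = _
      rw [width2fieldLoop]
      simp only [PySem.Int.mod_eq_emod_of_pos (by norm_num : (0:Int) < 6)]
      split_ifs <;> simp only [width2fieldLoop, Prod.mk.injEq] <;> constructor <;> omega
    · show width2fieldLoop (0+1) _ _ = _
      rw [width2fieldLoop]
      simp only [PySem.Int.mod_eq_emod_of_pos (by norm_num : (0:Int) < 6)]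
      split_ifs <;> simp only [width2fieldLoop, Prod.mk.injEq] <;> constructor <;> omega
    · simp only [Prod.mk.injEq]; constructor <;> omega
  · simp only [Prod.mk.injEq]; constructor <;> omega

-- ===== VERDICT (by name: the statement is the Claim_ definition above) =====
theorem width2field_spec : Claim_equal_width2field := by
  intro top left right player _
  unfold Spec_width2field width2field width2field_alt
  rw [width2fieldLoop_eq]
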